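-- pv_equiv track=rewrite | github.com/lachimex/WDI | do_kolokwium5.py | zamiana_4
-- ===== SOURCE A (Python) =====
-- def zamiana_4(n):
--     liczba = 0
--     i = 0
--     while n > 0:
--         liczba += (n % 4) * 10**i
--         i += 1
--         n //= 4
--     return liczba
-- ===== SOURCE B (Python) =====
-- def zamiana_4(n):
--     digits = []
--     while n > 0:
--         digits.append(n % 4)
--         n //= 4
--     result = 0
--     for d in reversed(digits):
--         result = result * 10 + d
--     return result
-- ===== Notes on version B (the rewrite author's own statement) =====
-- stated objective: alternative
-- what changed: A interleaves accumulation with a running power of ten in a single loop; B first collects the base-four digits into a list, then folds the list high-to-low with Horner's scheme, never computing powers of ten.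
import Mathlib
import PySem

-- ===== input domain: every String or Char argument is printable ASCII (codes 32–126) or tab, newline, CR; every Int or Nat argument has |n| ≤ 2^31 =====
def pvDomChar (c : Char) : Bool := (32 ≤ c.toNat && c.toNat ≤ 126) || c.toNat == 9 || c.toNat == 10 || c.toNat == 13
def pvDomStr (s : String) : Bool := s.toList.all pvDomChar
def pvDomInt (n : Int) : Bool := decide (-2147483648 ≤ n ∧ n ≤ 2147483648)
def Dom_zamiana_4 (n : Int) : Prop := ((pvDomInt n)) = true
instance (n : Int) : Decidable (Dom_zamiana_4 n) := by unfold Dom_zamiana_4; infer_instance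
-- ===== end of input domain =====

-- B collects the base-4 digits first and then folds them high-to-low with Horner's scheme,
-- instead of A's single loop with a running power 10**i (objective: alternative decomposition).

-- termination measure lemma for both recursions (n // 4 shrinks while n > 0)
theorem pvFloordiv4_toNat_lt (n : Int) (h : n > 0) :
    (PySem.Int.floordiv n 4).toNat < n.toNat := by
  rw [PySem.Int.floordiv_eq_ediv_of_pos (by omega : (0:Int) < 4)]
  omega

-- ===== PORT A =====
-- the while-loop of A, state (n, liczba, i); 10**i ported as 10 ^ i.toNat (i stays ≥ 0)
def zamiana_4_loop (n liczba i : Int) : Int :=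
  if h : n > 0 then
    zamiana_4_loop (PySem.Int.floordiv n 4) (liczba + (PySem.Int.mod n 4) * 10 ^ i.toNat) (i + 1)
  else liczba
termination_by n.toNat
decreasing_by exact pvFloordiv4_toNat_lt n h

def zamiana_4 (n : Int) : Int := zamiana_4_loop n 0 0

-- ===== PORT B =====
-- first pass: collect base-4 digits, low to high
def zamiana_4_digits (n : Int) : List Int :=
  if h : n > 0 then (PySem.Int.mod n 4) :: zamiana_4_digits (PySem.Int.floordiv n 4)
  else []
termination_by n.toNat
decreasing_by exact pvFloordiv4_toNat_lt n h

-- second pass: Horner over the reversed digit list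
def zamiana_4_alt (n : Int) : Int :=
  (zamiana_4_digits n).reverse.foldl (fun result d => result * 10 + d) 0

-- ===== PRECONDITION & SPEC =====
def Spec_zamiana_4 (n : Int) (out : Int) : Prop := out = zamiana_4_alt n
instance (n : Int) (out : Int) : Decidable (Spec_zamiana_4 n out) := by unfold Spec_zamiana_4; infer_instance

-- ===== CLAIM (what is proved, stated in full; the proofs are below) =====
def Claim_equal_zamiana_4 : Prop := ∀ (n : Int), Dom_zamiana_4 n → Spec_zamiana_4 n (zamiana_4 n)

-- ===== LEMMAS AND PROOFS =====
-- low-to-high valuation of a digit list in base 10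
def pvVal (l : List Int) : Int := l.foldr (fun d r => d + 10 * r) 0

theorem zamiana_4_loop_eq (k : Nat) : ∀ (n liczba i : Int), n.toNat ≤ k → 0 ≤ i →
    zamiana_4_loop n liczba i = liczba + 10 ^ i.toNat * pvVal (zamiana_4_digits n) := by
  induction k with
  | zero =>
    intro n liczba i hk _
    rw [zamiana_4_loop, zamiana_4_digits]
    simp only [show ¬ n > 0 by omega]
    simp [pvVal]
  | succ k ih =>
    intro n liczba i hk hi
    rw [zamiana_4_loop, zamiana_4_digits]
    by_cases h : n > 0
    · simp only [h, dif_pos]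
      rw [ih _ _ _ (by have := pvFloordiv4_toNat_lt n h; omega) (by omega)]
      have hpow : (i + 1).toNat = i.toNat + 1 := by omega
      simp only [pvVal, List.foldr, hpow, pow_succ]
      ring
    · simp [h, pvVal]

theorem alt_eq_val (n : Int) : zamiana_4_alt n = pvVal (zamiana_4_digits n) := by
  rw [zamiana_4_alt, List.foldl_reverse]
  induction zamiana_4_digits n with
  | nil => rfl
  | cons d l ih => simp [pvVal, List.foldr] at ih ⊢; rw [ih]; ring

-- ===== VERDICT (by name: the statement is the Claim_ definition above) =====
theorem zamiana_4_spec : Claim_equal_zamiana_4 := by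
  intro n _
  unfold Spec_zamiana_4
  rw [zamiana_4, zamiana_4_loop_eq n.toNat n 0 0 le_rfl le_rfl, alt_eq_val]
  simp
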